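-- pv_equiv track=rewrite | github.com/jramaswami/Binary_Search_Python | largest_rectangle_submatrix.py | solve
-- ===== SOURCE A (Python) =====
-- from collections import namedtuple
--
-- Item = namedtuple('Item', ['height', 'index'])
--
-- def solve(matrix):
--     # Corner case:
--     if len(matrix) == 0 or len(matrix[0]) == 0:
--         return 0
--
--     # The "height" of the column at (r, c).
--     height = [[0 for _ in row] for row in matrix]
--
--     for c, _ in enumerate(matrix[0]):
--         for r, _ in enumerate(matrix):
--             if r == 0:
--                 height[r][c] = matrix[r][c]
--             else:
--                 if matrix[r][c]:
--                     height[r][c] = matrix[r][c] + height[r-1][c]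
--
--     soln = 0
--
--     # Left to right
--     for r, row in enumerate(height):
--         # Stack holds the leftmost index for a given height.
--         # Stack invariant: heights are in ascending order.
--         stack = []
--         for c, ht in enumerate(row):
--             # Add current index to stack.
--             stack.append(Item(ht, c))
--
--             # Fix the stack.  Find the leftmost item with a height greater
--             # than ht.  Replace that item with an item at the same index
--             # but with a height of ht.
--             leftmost_index = c
--             while stack and stack[-1].height >= ht:
--                 leftmost_index = min(c, stack[-1].index)
--                 stack.pop()
--             stack.append(Item(ht, leftmost_index))
--
--             soln = max(soln,
--                     max(
--                         s.height * (1 + c - s.index) for s in stack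
--                     )
--             )
--
--     return soln
-- ===== SOURCE B (Python) =====
-- def solve(matrix):
--     # Simpler: no stack; per row, scan each right end leftward with a running
--     # minimum instead of maintaining A's monotonic stack of (height, index) items.
--     if len(matrix) == 0 or len(matrix[0]) == 0:
--         return 0
--     w = len(matrix[0])
--     heights = list(matrix[0][:w])
--     best = 0
--     first = True
--     for row in matrix:
--         if not first:
--             heights = [row[c] + heights[c] if row[c] else 0 for c in range(w)]
--         first = False
--         for c in range(w):
--             m = heights[c]
--             for i in range(c, -1, -1):
--                 if heights[i] < m:
--                     m = heights[i]
--                 p = m * (c - i + 1)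
--                 if p > best:
--                     best = p
--     return best
-- ===== Notes on version B (the rewrite author's own statement) =====
-- stated objective: simpler
-- what changed: B drops A's monotonic stack of (height,index) items (push, pop-while, re-push, max over the whole stack) and instead scans, for each row histogram and each right end, leftward with a running minimum, accumulating the best area directly.
import Mathlib
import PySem

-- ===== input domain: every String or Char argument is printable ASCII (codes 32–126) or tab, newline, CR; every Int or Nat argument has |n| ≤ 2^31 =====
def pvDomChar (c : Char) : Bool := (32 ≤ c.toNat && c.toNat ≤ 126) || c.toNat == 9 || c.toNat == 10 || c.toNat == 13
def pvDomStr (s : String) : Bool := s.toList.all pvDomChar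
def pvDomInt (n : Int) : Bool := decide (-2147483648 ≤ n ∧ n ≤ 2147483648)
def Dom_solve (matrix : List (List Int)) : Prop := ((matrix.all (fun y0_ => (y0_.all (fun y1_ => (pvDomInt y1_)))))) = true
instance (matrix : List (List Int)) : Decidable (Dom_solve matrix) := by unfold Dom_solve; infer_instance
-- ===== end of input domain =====

-- B replaces A's monotonic stack of (height, index) items by a plain running-minimum
-- scan over each right end; same result, no stack bookkeeping (objective: simpler).

-- ===== PORT A =====
-- the while-loop fixing the stack (stack top at list head)
def popLoop (ht : Int) (c : Nat) : List (Int × Nat) → Nat → (List (Int × Nat) × Nat)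
  | [], lm => ([], lm)
  | s :: rest, lm => if ht ≤ s.1 then popLoop ht c rest (min c s.2) else (s :: rest, lm)

-- Python max(...) over a nonempty generator; [] is unreachable (the stack was just pushed onto)
def genMax : List Int → Int
  | [] => 0
  | x :: xs => xs.foldl max x

-- the 'for c, ht in enumerate(row)' loop
def rowLoop : List Int → Nat → List (Int × Nat) → Int → Int
  | [], _, _, soln => soln
  | ht :: rest, c, stack, soln =>
    let stack1 := (ht, c) :: stack
    let pr := popLoop ht c stack1 c
    let stack3 := (ht, pr.2) :: pr.1
    let soln' := max soln (genMax ((stack3.reverse).map (fun s => s.1 * (1 + (c : Int) - (s.2 : Int)))))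
    rowLoop rest (c+1) stack3 soln'

def solve (matrix : List (List Int)) : Int :=
  match matrix with
  | [] => 0
  | r0 :: _ =>
    if r0.length = 0 then 0
    else
      let H0 := matrix.map (fun row => row.map (fun _ => (0 : Int)))
      let H := (List.range r0.length).foldl (fun H c =>
        (List.range matrix.length).foldl (fun H r =>
          if r = 0 then H.set r ((H.getD r []).set c ((matrix.getD r []).getD c 0))
          else if (matrix.getD r []).getD c 0 ≠ 0 then
            H.set r ((H.getD r []).set c
              ((matrix.getD r []).getD c 0 + (H.getD (r-1) []).getD c 0))
          else H) H) H0
      H.foldl (fun soln hrow => rowLoop hrow 0 [] soln) 0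

-- ===== PORT B =====
-- the heights-update comprehension
def nextH (w : Nat) (row hprev : List Int) : List Int :=
  (List.range w).map (fun c => if row.getD c 0 ≠ 0 then row.getD c 0 + hprev.getD c 0 else 0)

-- 'for i in range(c, -1, -1)' with running minimum m
def innerLoop (heights : List Int) (c : Nat) (i : Nat) (m best : Int) : Int :=
  let hi := heights.getD i 0
  let m' := if hi < m then hi else m
  let p := m' * ((c : Int) - (i : Int) + 1)
  let best' := if best < p then p else best
  match i with
  | 0 => best'
  | i' + 1 => innerLoop heights c i' m' best'

-- 'for c in range(w)'
def colLoop (heights : List Int) (w : Nat) (best : Int) : Int :=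
  (List.range w).foldl (fun best c => innerLoop heights c c (heights.getD c 0) best) best

def solve_alt (matrix : List (List Int)) : Int :=
  match matrix with
  | [] => 0
  | r0 :: _ =>
    if r0.length = 0 then 0
    else
      let w := r0.length
      (matrix.foldl (fun (st : Int × List Int × Bool) row =>
        let heights := if st.2.2 then st.2.1 else nextH w row st.2.1
        (colLoop heights w st.1, heights, false)) ((0 : Int), r0.take w, true)).1

-- ===== PRECONDITION & SPEC =====
-- Pre_ excludes exactly the inputs where Python A raises IndexError: a nonempty first
-- row together with some later row shorter than it (matrix[r][c] is then out of range).
def Pre_solve (matrix : List (List Int)) : Prop :=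
  matrix = [] ∨ (matrix.headD []).length = 0 ∨ ∀ row ∈ matrix, (matrix.headD []).length ≤ row.length
instance (matrix : List (List Int)) : Decidable (Pre_solve matrix) := by unfold Pre_solve; infer_instance

def pvWitness_solve : List (List Int) := [[1, 0, 1], [1, 1, 1]]

def Spec_solve (matrix : List (List Int)) (out : Int) : Prop := out = solve_alt matrix
instance (matrix : List (List Int)) (out : Int) : Decidable (Spec_solve matrix out) := by unfold Spec_solve; infer_instance

-- ===== CLAIM (what is proved, stated in full; the proofs are below) =====
def Claim_equal_solve : Prop := ∀ (matrix : List (List Int)), Dom_solve matrix → Pre_solve matrix → Spec_solve matrix (solve matrix)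

-- ===== LEMMAS AND PROOFS =====

def rmin (h : List Int) (c : Nat) (i : Nat) : Int :=
  if _h : i < c then min (h.getD i 0) (rmin h c (i+1)) else h.getD c 0
termination_by c - i

lemma rmin_step (h : List Int) {c i : Nat} (hic : i < c) :
    rmin h c i = min (h.getD i 0) (rmin h c (i+1)) := by
  rw [rmin]; simp [hic]

lemma rmin_of_ge (h : List Int) {c i : Nat} (hic : c ≤ i) : rmin h c i = h.getD c 0 := by
  rw [rmin]; simp [Nat.not_lt.mpr hic]

lemma rmin_self (h : List Int) (c : Nat) : rmin h c c = h.getD c 0 := rmin_of_ge h le_rfl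

lemma rmin_le_getD (h : List Int) (c : Nat) : ∀ n i j, c - i ≤ n → i ≤ j → j ≤ c → rmin h c i ≤ h.getD j 0 := by
  intro n
  induction n with
  | zero =>
    intro i j h1 h2 h3
    obtain rfl : i = c := by omega
    obtain rfl : j = i := by omega
    rw [rmin_self]
  | succ n IH =>
    intro i j h1 h2 h3
    by_cases hic : i < c
    · rw [rmin_step h hic]
      rcases Nat.eq_or_lt_of_le h2 with rfl | hij
      · exact min_le_left _ _
      · exact le_trans (min_le_right _ _) (IH (i+1) j (by omega) (by omega) h3)
    · obtain rfl : i = c := by omega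
      obtain rfl : j = i := by omega
      rw [rmin_self]

lemma rmin_mono (h : List Int) (c : Nat) : ∀ n i i', c - i ≤ n → i ≤ i' → i' ≤ c → rmin h c i ≤ rmin h c i' := by
  intro n
  induction n with
  | zero =>
    intro i i' h1 h2 h3
    obtain rfl : i' = i := by omega
    exact le_rfl
  | succ n IH =>
    intro i i' h1 h2 h3
    rcases Nat.eq_or_lt_of_le h2 with rfl | hlt
    · exact le_rfl
    · have hic : i < c := by omega
      rw [rmin_step h hic]
      exact le_trans (min_le_right _ _) (IH (i+1) i' (by omega) (by omega) h3)

lemma rmin_congr (h h' : List Int) (c : Nat) : ∀ n i, c - i ≤ n → i ≤ c →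
    (∀ j, i ≤ j → j ≤ c → h.getD j 0 = h'.getD j 0) → rmin h c i = rmin h' c i := by
  intro n
  induction n with
  | zero =>
    intro i h1 h2 hj
    obtain rfl : i = c := by omega
    rw [rmin_self, rmin_self]
    exact hj i le_rfl le_rfl
  | succ n IH =>
    intro i h1 h2 hj
    by_cases hic : i < c
    · rw [rmin_step h hic, rmin_step h' hic,
        hj i le_rfl (by omega), IH (i+1) (by omega) (by omega) (fun j a b => hj j (by omega) b)]
    · obtain rfl : i = c := by omega
      rw [rmin_self, rmin_self]
      exact hj i le_rfl le_rfl

lemma rmin_succ_right (h : List Int) (c : Nat) : ∀ n i, c - i ≤ n → i ≤ c →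
    rmin h (c+1) i = min (rmin h c i) (h.getD (c+1) 0) := by
  intro n
  induction n with
  | zero =>
    intro i h1 h2
    obtain rfl : i = c := by omega
    rw [rmin_step h (by omega : i < i + 1), rmin_of_ge h (le_refl (i+1)), rmin_self]
  | succ n IH =>
    intro i h1 h2
    rcases Nat.eq_or_lt_of_le h2 with rfl | hic
    · rw [rmin_step h (by omega : i < i + 1), rmin_of_ge h (le_refl (i+1)), rmin_self]
    · rw [rmin_step h (by omega : i < c + 1), rmin_step h hic,
        IH (i+1) (by omega) (by omega), min_assoc]

-- max-fold helpers
lemma foldl_max_le {b : Int} : ∀ (l : List Int) (a : Int), a ≤ b → (∀ x ∈ l, x ≤ b) → l.foldl max a ≤ b := by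
  intro l
  induction l with
  | nil => intro a h1 _; exact h1
  | cons x xs IH =>
    intro a h1 h2
    exact IH (max a x) (max_le h1 (h2 x (by simp))) (fun y hy => h2 y (by simp [hy]))

def pairVal (h : List Int) (c i : Nat) : Int := rmin h c i * ((c : Int) - (i : Int) + 1)

def colPairs (h : List Int) (c : Nat) : List Int := ((List.range (c+1)).reverse).map (pairVal h c)

def rowPairs (h : List Int) : List Int := (List.range h.length).flatMap (colPairs h)

def S (acc : Int) (h : List Int) : Int := (rowPairs h).foldl max acc

lemma mem_rowPairs {x : Int} {h : List Int} :
    x ∈ rowPairs h ↔ ∃ c, c < h.length ∧ ∃ i, i ≤ c ∧ x = pairVal h c i := by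
  simp only [rowPairs, colPairs, List.mem_flatMap, List.mem_map, List.mem_reverse, List.mem_range]
  constructor
  · rintro ⟨c, hc, i, hi, rfl⟩; exact ⟨c, hc, i, by omega, rfl⟩
  · rintro ⟨c, hc, i, hi, rfl⟩; exact ⟨c, hc, i, by omega, rfl⟩

lemma acc_le_S (acc : Int) (h : List Int) : acc ≤ S acc h := (PySem.List.le_foldl_max _ _).1

lemma pair_le_S {x : Int} {h : List Int} (acc : Int) (hx : x ∈ rowPairs h) : x ≤ S acc h :=
  (PySem.List.le_foldl_max _ _).2 x hx

lemma S_le {acc b : Int} {h : List Int} (h1 : acc ≤ b) (h2 : ∀ x ∈ rowPairs h, x ≤ b) :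
    S acc h ≤ b := foldl_max_le _ _ h1 h2


-- B's inner loop computes the column pairs fold
lemma innerLoop_zero (h : List Int) (c : Nat) (m best : Int) :
    innerLoop h c 0 m best =
      (if best < (if h.getD 0 0 < m then h.getD 0 0 else m) * ((c : Int) - (0 : Nat) + 1)
       then (if h.getD 0 0 < m then h.getD 0 0 else m) * ((c : Int) - (0 : Nat) + 1) else best) := rfl

lemma innerLoop_succ (h : List Int) (c i : Nat) (m best : Int) :
    innerLoop h c (i+1) m best =
      innerLoop h c i (if h.getD (i+1) 0 < m then h.getD (i+1) 0 else m)
        (if best < (if h.getD (i+1) 0 < m then h.getD (i+1) 0 else m) * ((c : Int) - ((i+1 : Nat) : Int) + 1)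
         then (if h.getD (i+1) 0 < m then h.getD (i+1) 0 else m) * ((c : Int) - ((i+1 : Nat) : Int) + 1) else best) := rfl

lemma min_as_ite (a b : Int) : (if a < b then a else b) = min a b := by
  rw [min_def]; split_ifs <;> omega

lemma max_as_ite (a b : Int) : (if a < b then b else a) = max a b := by
  rw [max_def]; split_ifs <;> omega

lemma innerLoop_run (h : List Int) (c : Nat) : ∀ i m best, i ≤ c → min (h.getD i 0) m = rmin h c i →
    innerLoop h c i m best
      = (((List.range (i+1)).reverse).map (pairVal h c)).foldl max best := by
  intro i
  induction i with
  | zero =>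
    intro m best _ hm
    rw [innerLoop_zero, min_as_ite, hm]
    simp [pairVal, max_as_ite]
  | succ i IH =>
    intro m best hic hm
    rw [innerLoop_succ, min_as_ite, hm]
    rw [IH (rmin h c (i+1)) _ (by omega) (by rw [← rmin_step h (by omega : i < c)])]
    conv_rhs => rw [List.range_succ, List.reverse_append, List.reverse_singleton,
      List.singleton_append, List.map_cons, List.foldl_cons]
    congr 1
    rw [max_as_ite]
    simp only [pairVal]

-- ---------- A-side: stack invariant ----------

-- first stack item (top first) whose index is ≤ i
def lkp : List (Int × Nat) → Nat → Option (Int × Nat)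
  | [], _ => none
  | q :: rest, i => if q.2 ≤ i then some q else lkp rest i

lemma lkp_mem : ∀ {st : List (Int × Nat)} {i : Nat} {q : Int × Nat}, lkp st i = some q → q ∈ st := by
  intro st
  induction st with
  | nil => intro i q h; simp [lkp] at h
  | cons a rest IH =>
    intro i q h
    by_cases ha : a.2 ≤ i
    · simp [lkp, ha] at h; simp [h]
    · simp [lkp, ha] at h; exact List.mem_cons_of_mem _ (IH h)

lemma lkp_le : ∀ {st : List (Int × Nat)} {i : Nat} {q : Int × Nat}, lkp st i = some q → q.2 ≤ i := by
  intro st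
  induction st with
  | nil => intro i q h; simp [lkp] at h
  | cons a rest IH =>
    intro i q h
    by_cases ha : a.2 ≤ i
    · simp [lkp, ha] at h; exact h ▸ ha
    · simp [lkp, ha] at h; exact IH h

def StInv (p : List Int) (st : List (Int × Nat)) : Prop :=
  List.Pairwise (fun a b => b.2 < a.2) st ∧
  List.Pairwise (fun a b => b.1 < a.1) st ∧
  (∀ q ∈ st, q.2 < p.length ∧ q.1 = rmin p (p.length - 1) q.2) ∧
  (∀ i, i < p.length → ∃ q, lkp st i = some q ∧ q.1 = rmin p (p.length - 1) i)

lemma popLoop_facts (x : Int) (c : Nat) : ∀ (st : List (Int × Nat)) (lm0 : Nat),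
    (∀ q ∈ st, q.2 < lm0) → lm0 ≤ c →
    List.Pairwise (fun a b => b.2 < a.2) st → List.Pairwise (fun a b => b.1 < a.1) st →
    (∃ tail, st = tail ++ (popLoop x c st lm0).1) ∧
    (∀ q ∈ (popLoop x c st lm0).1, q.1 < x ∧ q.2 < (popLoop x c st lm0).2) ∧
    (popLoop x c st lm0).2 ≤ lm0 ∧
    (∀ i, i < (popLoop x c st lm0).2 → lkp st i = lkp (popLoop x c st lm0).1 i) ∧
    ((popLoop x c st lm0).2 = lm0 ∨
      (∃ qL, qL ∈ st ∧ x ≤ qL.1 ∧ qL.2 = (popLoop x c st lm0).2 ∧ lkp st (popLoop x c st lm0).2 = some qL)) := by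
  intro st
  induction st with
  | nil =>
    intro lm0 _ _ _ _
    refine ⟨⟨[], rfl⟩, ?_, le_rfl, ?_, Or.inl rfl⟩ <;> simp [popLoop]
  | cons q rest IH =>
    intro lm0 hidx hlm hpi hph
    by_cases hx : x ≤ q.1
    · have hrec : popLoop x c (q :: rest) lm0 = popLoop x c rest (min c q.2) := by
        simp [popLoop, hx]
      have hq2 : min c q.2 = q.2 := by
        have := hidx q (by simp); omega
      rw [hrec, hq2]
      have hidx' : ∀ q' ∈ rest, q'.2 < q.2 := fun q' hq' => (List.pairwise_cons.mp hpi).1 q' hq'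
      obtain ⟨⟨tail, htail⟩, hre, hlm2, hlkp, hlast⟩ :=
        IH q.2 hidx' (by have := hidx q (by simp); omega)
          (List.pairwise_cons.mp hpi).2 (List.pairwise_cons.mp hph).2
      refine ⟨⟨q :: tail, by rw [List.cons_append, ← htail]⟩, hre, by have := hidx q (by simp); omega, ?_, ?_⟩
      · intro i hi
        have hiq : ¬ q.2 ≤ i := by omega
        rw [show lkp (q :: rest) i = lkp rest i by simp [lkp, hiq]]
        exact hlkp i hi
      · rcases hlast with heq | ⟨qL, hmem, hxl, hql, hlkpl⟩
        · refine Or.inr ⟨q, by simp, hx, heq.symm ▸ rfl, ?_⟩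
          rw [heq]; simp [lkp]
        · refine Or.inr ⟨qL, List.mem_cons_of_mem _ hmem, hxl, hql, ?_⟩
          have : ¬ q.2 ≤ (popLoop x c rest q.2).2 := by
            have := hidx' qL hmem; omega
          simpa [lkp, this] using hlkpl
    · have hrec : popLoop x c (q :: rest) lm0 = (q :: rest, lm0) := by
        simp [popLoop, hx]
      rw [hrec]
      refine ⟨⟨[], rfl⟩, ?_, le_rfl, fun i _ => rfl, Or.inl rfl⟩
      intro q' hq'
      rcases List.mem_cons.mp hq' with rfl | hq'
      · exact ⟨by omega, hidx _ (by simp)⟩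
      · exact ⟨lt_trans ((List.pairwise_cons.mp hph).1 q' hq') (by omega), hidx _ (by simp [hq'])⟩

lemma getD_snoc_length (p : List Int) (x : Int) : (p ++ [x]).getD p.length 0 = x := by
  simp [List.getD]

lemma getD_snoc_lt (p : List Int) (x : Int) {j : Nat} (hj : j < p.length) :
    (p ++ [x]).getD j 0 = p.getD j 0 := by
  simp [List.getD, List.getElem?_append_left hj]

lemma rmin_snoc (p : List Int) (x : Int) {i : Nat} (hi : i < p.length) :
    rmin (p ++ [x]) p.length i = min (rmin p (p.length - 1) i) x := by
  obtain ⟨c', hc⟩ : ∃ c', p.length = c' + 1 := ⟨p.length - 1, by omega⟩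
  rw [hc, rmin_succ_right (p ++ [x]) c' (c' + 1) i (by omega) (by omega), ← hc,
    getD_snoc_length,
    rmin_congr (p ++ [x]) p c' (c' + 1) i (by omega) (by omega)
      (fun j _ hj => getD_snoc_lt p x (by omega)), hc]
  simp

lemma rmin_snoc_self (p : List Int) (x : Int) : rmin (p ++ [x]) p.length p.length = x := by
  rw [rmin_self, getD_snoc_length]

lemma le_genMax : ∀ {l : List Int} {v : Int}, v ∈ l → v ≤ genMax l := by
  intro l v hv
  cases l with
  | nil => simp at hv
  | cons x xs =>
    rcases List.mem_cons.mp hv with rfl | hv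
    · exact (PySem.List.le_foldl_max _ _).1
    · exact (PySem.List.le_foldl_max _ _).2 _ hv

lemma genMax_le {b : Int} : ∀ {l : List Int}, l ≠ [] → (∀ v ∈ l, v ≤ b) → genMax l ≤ b := by
  intro l hne hb
  cases l with
  | nil => simp at hne
  | cons x xs => exact foldl_max_le xs x (hb x (by simp)) (fun y hy => hb y (by simp [hy]))

lemma pop_first (x : Int) (c : Nat) (st : List (Int × Nat)) :
    popLoop x c ((x, c) :: st) c = popLoop x c st c := by
  simp [popLoop]

-- pushing the invariant through one column step of A's loop
lemma step_inv (p : List Int) (x : Int) (st : List (Int × Nat)) (hInv : StInv p st) :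
    StInv (p ++ [x])
      ((x, (popLoop x p.length ((x, p.length) :: st) p.length).2) ::
        (popLoop x p.length ((x, p.length) :: st) p.length).1) := by
  obtain ⟨hpi, hph, hmem, hcov⟩ := hInv
  rw [pop_first]
  have hidx : ∀ q ∈ st, q.2 < p.length := fun q hq => (hmem q hq).1
  obtain ⟨⟨tail, htail⟩, hre, hlm, hlkp, hlast⟩ :=
    popLoop_facts x p.length st p.length hidx le_rfl hpi hph
  set pr := popLoop x p.length st p.length with hpr
  have hmem' : ∀ q ∈ pr.1, q ∈ st := fun q hq => htail ▸ List.mem_append_right _ hq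
  have hlen : (p ++ [x]).length = p.length + 1 := by simp
  have hlen1 : (p ++ [x]).length - 1 = p.length := by omega
  have hxr : x = rmin (p ++ [x]) p.length pr.2 := by
    rcases hlast with heq | ⟨qL, hqL, hxle, hql2, _⟩
    · rw [heq, rmin_snoc_self]
    · have hq2 : qL.2 < p.length := hidx qL hqL
      rw [rmin_snoc p x (hql2 ▸ hq2)]
      have : x ≤ rmin p (p.length - 1) pr.2 := hql2 ▸ (hxle.trans_eq (hmem qL hqL).2)
      omega
  refine ⟨?_, ?_, ?_, ?_⟩
  · exact List.pairwise_cons.mpr ⟨fun q hq => (hre q hq).2,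
      hpi.sublist (htail ▸ (List.suffix_append tail pr.1).sublist)⟩
  · exact List.pairwise_cons.mpr ⟨fun q hq => (hre q hq).1,
      hph.sublist (htail ▸ (List.suffix_append tail pr.1).sublist)⟩
  · intro q hq
    rcases List.mem_cons.mp hq with rfl | hq
    · exact ⟨by simpa [hlen] using Nat.lt_succ_of_le hlm, by rw [hlen1]; exact hxr⟩
    · have hq2 : q.2 < p.length := hidx q (hmem' q hq)
      refine ⟨by simp [hlen]; omega, ?_⟩
      rw [hlen1, rmin_snoc p x hq2, ← (hmem q (hmem' q hq)).2]
      have : q.1 < x := (hre q hq).1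
      omega
  · intro i hi
    rw [hlen] at hi
    rw [hlen1]
    by_cases hi2 : pr.2 ≤ i
    · refine ⟨(x, pr.2), by simp [lkp, hi2], ?_⟩
      rcases Nat.lt_succ_iff_lt_or_eq.mp hi with hic | rfl
      · rw [rmin_snoc p x hic]
        rcases hlast with heq | ⟨qL, hqL, hxle, hql2, _⟩
        · omega
        · have hq2 : qL.2 < p.length := hidx qL hqL
          have h1 : x ≤ rmin p (p.length - 1) pr.2 := hql2 ▸ (hxle.trans_eq (hmem qL hqL).2)
          have h2 : rmin p (p.length - 1) pr.2 ≤ rmin p (p.length - 1) i :=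
            rmin_mono p (p.length - 1) (p.length - 1) pr.2 i (by omega) hi2 (by omega)
          omega
      · exact (rmin_snoc_self p x).symm
    · have hlkpi : lkp ((x, pr.2) :: pr.1) i = lkp pr.1 i := by
        simp [lkp, hi2]
      have hic : i < p.length := by omega
      obtain ⟨q, hq, hqv⟩ := hcov i hic
      have hq' : lkp pr.1 i = some q := (hlkp i (by omega)).symm.trans hq
      have hqre : q ∈ pr.1 := lkp_mem hq'
      refine ⟨q, by rw [hlkpi, hq'], ?_⟩
      rw [rmin_snoc p x hic, ← hqv]
      have : q.1 < x := (hre q hqre).1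
      omega

-- one column step of the soln accumulator
lemma soln_step (p : List Int) (x : Int) (lm : Nat) (re : List (Int × Nat)) (soln acc : Int)
    (hInv : StInv (p ++ [x]) ((x, lm) :: re))
    (hsoln : soln = (rowPairs p).foldl max acc) (hacc : 0 ≤ acc) :
    max soln (genMax ((((x, lm) :: re).reverse).map
        (fun s => s.1 * (1 + (p.length : Int) - (s.2 : Int)))))
      = (rowPairs (p ++ [x])).foldl max acc := by
  obtain ⟨hpi, hph, hmem, hcov⟩ := hInv
  have hlen : (p ++ [x]).length = p.length + 1 := by simp
  have hlen1 : (p ++ [x]).length - 1 = p.length := by omega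
  have hsp : rowPairs (p ++ [x]) = rowPairs p ++ colPairs (p ++ [x]) p.length := by
    rw [rowPairs, hlen, List.range_succ, List.flatMap_append, rowPairs]
    congr 1
    · apply List.flatMap_congr
      intro c' hc'
      have hc : c' < p.length := List.mem_range.mp hc'
      apply List.map_congr_left
      intro i hi
      have hi' : i < c' + 1 := by simpa using List.mem_range.mp (List.mem_reverse.mp hi)
      unfold pairVal
      rw [rmin_congr (p ++ [x]) p c' (c' + 1) i (by omega) (by omega)
        (fun j _ hj => getD_snoc_lt p x (by omega))]
    · simp [colPairs]
  rw [hsp, List.foldl_append, ← hsoln]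
  have hsoln0 : 0 ≤ soln := le_trans hacc (hsoln ▸ (PySem.List.le_foldl_max _ _).1)
  apply le_antisymm
  · apply max_le
    · exact (PySem.List.le_foldl_max _ _).1
    · apply genMax_le (by simp)
      intro v hv
      obtain ⟨q, hq, rfl⟩ := List.mem_map.mp hv
      have hq' : q ∈ (x, lm) :: re := List.mem_reverse.mp hq
      obtain ⟨hq2, hq1⟩ := hmem q hq'
      rw [hlen] at hq2; rw [hlen1] at hq1
      have : q.1 * (1 + (p.length : Int) - (q.2 : Int)) = pairVal (p ++ [x]) p.length q.2 := by
        rw [pairVal, ← hq1]; ring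
      rw [this]
      exact (PySem.List.le_foldl_max _ _).2 _
        (List.mem_map.mpr ⟨q.2, List.mem_reverse.mpr (List.mem_range.mpr (by omega)), rfl⟩)
  · apply foldl_max_le
    · exact le_max_left _ _
    · intro v hv
      obtain ⟨i, hi, rfl⟩ := List.mem_map.mp hv
      have hi' : i < p.length + 1 := List.mem_range.mp (List.mem_reverse.mp hi)
      by_cases h0 : rmin (p ++ [x]) p.length i ≤ 0
      · have : pairVal (p ++ [x]) p.length i ≤ 0 := by
          unfold pairVal
          have : (0 : Int) ≤ (p.length : Int) - (i : Int) + 1 := by omega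
          exact mul_nonpos_of_nonpos_of_nonneg h0 this
        exact le_trans this (le_trans hsoln0 (le_max_left _ _))
      · obtain ⟨q, hq, hqv⟩ := hcov i (by omega)
        rw [hlen1] at hqv
        have hqm : q ∈ (x, lm) :: re := lkp_mem hq
        have hqle : q.2 ≤ i := lkp_le hq
        have hv1 : pairVal (p ++ [x]) p.length i ≤ q.1 * (1 + (p.length : Int) - (q.2 : Int)) := by
          rw [pairVal, ← hqv]
          have hw : ((p.length : Int) - (i : Int) + 1) ≤ (1 + (p.length : Int) - (q.2 : Int)) := by omega
          have h0' : (0 : Int) ≤ q.1 := by rw [hqv]; omega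
          exact mul_le_mul_of_nonneg_left hw h0'
        refine le_trans hv1 (le_trans (le_genMax ?_) (le_max_right _ _))
        exact List.mem_map.mpr ⟨q, List.mem_reverse.mpr hqm, rfl⟩

lemma rowLoop_cons (x : Int) (rest : List Int) (c : Nat) (stack : List (Int × Nat)) (soln : Int) :
    rowLoop (x :: rest) c stack soln =
      rowLoop rest (c+1)
        ((x, (popLoop x c ((x, c) :: stack) c).2) :: (popLoop x c ((x, c) :: stack) c).1)
        (max soln (genMax ((((x, (popLoop x c ((x, c) :: stack) c).2) ::
            (popLoop x c ((x, c) :: stack) c).1).reverse).map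
          (fun s => s.1 * (1 + (c : Int) - (s.2 : Int)))))) := rfl

lemma rowLoop_run : ∀ (rest p : List Int) (st : List (Int × Nat)) (soln acc : Int),
    StInv p st → 0 ≤ acc → soln = (rowPairs p).foldl max acc →
    rowLoop rest p.length st soln = (rowPairs (p ++ rest)).foldl max acc := by
  intro rest
  induction rest with
  | nil =>
    intro p st soln acc _ _ hsoln
    simp [rowLoop, hsoln]
  | cons x rest' IH =>
    intro p st soln acc hInv hacc hsoln
    rw [rowLoop_cons]
    have hInv' := step_inv p x st hInv
    have hsoln' := soln_step p x _ _ soln acc hInv' hsoln hacc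
    have hlen : (p ++ [x]).length = p.length + 1 := by simp
    have := IH (p ++ [x]) _ _ acc hInv' hacc hsoln'.symm.symm
    rw [hlen] at this
    rw [this, List.append_assoc]
    rfl

lemma rowLoop_S (h : List Int) (soln : Int) (hs : 0 ≤ soln) :
    rowLoop h 0 [] soln = S soln h := by
  have h0 : StInv [] [] := ⟨List.Pairwise.nil, List.Pairwise.nil, by simp, by simp⟩
  have := rowLoop_run h [] [] soln soln h0 hs rfl
  simpa [S] using this

lemma colLoop_run (h : List Int) (w : Nat) (best : Int) (hw : h.length = w) :
    colLoop h w best = S best h := by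
  subst hw
  rw [colLoop, S, rowPairs, List.foldl_flatMap]
  apply PySem.List.foldl_congr_mem
  intro acc c _
  rw [innerLoop_run h c c (h.getD c 0) acc le_rfl (by rw [min_self, rmin_self])]
  rfl

lemma S_ext (h h' : List Int) (acc : Int) (hacc : 0 ≤ acc) (hlen : h'.length ≤ h.length)
    (hg : ∀ j, h.getD j 0 = h'.getD j 0) : S acc h = S acc h' := by
  have hpv : ∀ c i, i ≤ c → pairVal h c i = pairVal h' c i := by
    intro c i hi
    unfold pairVal
    rw [rmin_congr h h' c c i (by omega) hi (fun j _ _ => hg j)]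
  apply le_antisymm
  · apply S_le (acc_le_S acc h')
    intro v hv
    obtain ⟨c, hc, i, hi, rfl⟩ := mem_rowPairs.mp hv
    by_cases hcw : c < h'.length
    · rw [hpv c i hi]
      exact pair_le_S acc (mem_rowPairs.mpr ⟨c, hcw, i, hi, rfl⟩)
    · have hr0 : rmin h c i ≤ 0 := by
        have := rmin_le_getD h c c i c (by omega) hi le_rfl
        rw [hg c, List.getD_eq_default _ _ (by omega)] at this
        exact this
      have : pairVal h c i ≤ 0 := by
        unfold pairVal
        exact mul_nonpos_of_nonpos_of_nonneg hr0 (by omega)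
      exact le_trans this (le_trans hacc (acc_le_S acc h'))
  · apply S_le (acc_le_S acc h)
    intro v hv
    obtain ⟨c, hc, i, hi, rfl⟩ := mem_rowPairs.mp hv
    rw [← hpv c i hi]
    exact pair_le_S acc (mem_rowPairs.mpr ⟨c, by omega, i, hi, rfl⟩)

-- ---------- phase 1: the height matrix ----------

-- the height recurrence, read off the input matrix
def Hf (M : List (List Int)) : Nat → Nat → Int
  | 0, c => (M.getD 0 []).getD c 0
  | r+1, c => if (M.getD (r+1) []).getD c 0 ≠ 0 then (M.getD (r+1) []).getD c 0 + Hf M r c else 0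

-- the body of A's phase-1 inner loop
def stepA (M : List (List Int)) (c : Nat) (H : List (List Int)) (r : Nat) : List (List Int) :=
  if r = 0 then H.set r ((H.getD r []).set c ((M.getD r []).getD c 0))
  else if (M.getD r []).getD c 0 ≠ 0 then
    H.set r ((H.getD r []).set c ((M.getD r []).getD c 0 + (H.getD (r-1) []).getD c 0))
  else H

lemma getD_set_self {α : Type} (d : α) (l : List α) (i : Nat) (v : α) (h : i < l.length) :
    (l.set i v).getD i d = v := by
  simp [List.getD, h]

lemma getD_set_ne {α : Type} (d : α) (l : List α) (i j : Nat) (v : α) (h : i ≠ j) :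
    (l.set i v).getD j d = l.getD j d := by
  simp [List.getD, h]

lemma setFacts (M : List (List Int)) (c : Nat) (Hn : List (List Int)) (n : Nat) (v : Int)
    (hlen : Hn.length = M.length) (hrow : ∀ r, (Hn.getD r []).length = (M.getD r []).length)
    (hnM : n < M.length) (hcn : c < (M.getD n []).length) :
    ((Hn.set n ((Hn.getD n []).set c v)).length = M.length) ∧
    (∀ r, ((Hn.set n ((Hn.getD n []).set c v)).getD r []).length = (M.getD r []).length) ∧
    (((Hn.set n ((Hn.getD n []).set c v)).getD n []).getD c 0 = v) ∧
    (∀ r, r ≠ n → (Hn.set n ((Hn.getD n []).set c v)).getD r [] = Hn.getD r []) ∧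
    (∀ j, j ≠ c → (((Hn.set n ((Hn.getD n []).set c v)).getD n []).getD j 0 = (Hn.getD n []).getD j 0)) := by
  have hnH : n < Hn.length := by omega
  have hself : (Hn.set n ((Hn.getD n []).set c v)).getD n [] = (Hn.getD n []).set c v :=
    getD_set_self [] Hn n _ hnH
  refine ⟨by simp [hlen], ?_, ?_, ?_, ?_⟩
  · intro r
    by_cases hr : r = n
    · subst hr; rw [hself, List.length_set]; exact hrow r
    · rw [getD_set_ne [] Hn n r _ (fun h => hr h.symm)]; exact hrow r
  · rw [hself]; exact getD_set_self 0 _ c v (by rw [hrow n]; exact hcn)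
  · intro r hr; exact getD_set_ne [] Hn n r _ (fun h => hr h.symm)
  · intro j hj; rw [hself]; exact getD_set_ne 0 _ c j v (fun h => hj h.symm)

lemma innerA (M : List (List Int)) (c : Nat)
    (hc : ∀ r, r < M.length → c < (M.getD r []).length) :
    ∀ (n : Nat), n ≤ M.length → ∀ (H0 : List (List Int)),
    H0.length = M.length → (∀ r, (H0.getD r []).length = (M.getD r []).length) →
    (∀ r, (H0.getD r []).getD c 0 = 0) →
    ((List.range n).foldl (stepA M c) H0).length = M.length ∧
    (∀ r, (((List.range n).foldl (stepA M c) H0).getD r []).length = (M.getD r []).length) ∧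
    (∀ r, r < n → (((List.range n).foldl (stepA M c) H0).getD r []).getD c 0 = Hf M r c) ∧
    (∀ r j, j ≠ c → (((List.range n).foldl (stepA M c) H0).getD r []).getD j 0 = (H0.getD r []).getD j 0) ∧
    (∀ r, n ≤ r → (((List.range n).foldl (stepA M c) H0).getD r []).getD c 0 = 0) := by
  intro n
  induction n with
  | zero =>
    intro _ H0 h1 h2 h3
    exact ⟨h1, h2, by omega, fun r j _ => rfl, fun r _ => h3 r⟩
  | succ n IH =>
    intro hn H0 h1 h2 h3
    obtain ⟨g1, g2, g3, g4, g5⟩ := IH (by omega) H0 h1 h2 h3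
    rw [List.range_succ, List.foldl_append, List.foldl_cons, List.foldl_nil]
    set Hn := (List.range n).foldl (stepA M c) H0 with hHn
    have hnM : n < M.length := by omega
    have hcn : c < (M.getD n []).length := hc n hnM
    rcases Nat.eq_zero_or_eq_succ_pred n with hn0 | hnp
    · subst hn0
      have hF := setFacts M c Hn 0 ((M.getD 0 []).getD c 0) g1 g2 hnM hcn
      rw [show stepA M c Hn 0 = Hn.set 0 ((Hn.getD 0 []).set c ((M.getD 0 []).getD c 0)) by
        simp [stepA]]
      refine ⟨hF.1, hF.2.1, ?_, ?_, ?_⟩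
      · intro r hr
        obtain rfl : r = 0 := by omega
        exact hF.2.2.1
      · intro r j hj
        by_cases hr : r = 0
        · subst hr; rw [hF.2.2.2.2 j hj]; exact g4 0 j hj
        · rw [hF.2.2.2.1 r hr]; exact g4 r j hj
      · intro r hr
        rw [hF.2.2.2.1 r (by omega)]; exact g5 r (by omega)
    · obtain ⟨n', rfl⟩ : ∃ n', n = n' + 1 := ⟨n - 1, by omega⟩
      by_cases hm : (M.getD (n'+1) []).getD c 0 ≠ 0
      · have hv := g3 n' (by omega)
        have hF := setFacts M c Hn (n'+1)
          ((M.getD (n'+1) []).getD c 0 + (Hn.getD n' []).getD c 0) g1 g2 hnM hcn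
        rw [show stepA M c Hn (n'+1) =
            Hn.set (n'+1) ((Hn.getD (n'+1) []).set c
              ((M.getD (n'+1) []).getD c 0 + (Hn.getD n' []).getD c 0)) by
          unfold stepA
          rw [if_neg (Nat.succ_ne_zero n'), if_pos hm, Nat.add_sub_cancel]]
        refine ⟨hF.1, hF.2.1, ?_, ?_, ?_⟩
        · intro r hr
          by_cases hrn : r = n' + 1
          · subst hrn
            rw [hF.2.2.1, hv, Hf, if_pos hm]
          · rw [hF.2.2.2.1 r hrn]; exact g3 r (by omega)
        · intro r j hj
          by_cases hr : r = n' + 1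
          · subst hr; rw [hF.2.2.2.2 j hj]; exact g4 _ j hj
          · rw [hF.2.2.2.1 r hr]; exact g4 r j hj
        · intro r hr
          rw [hF.2.2.2.1 r (by omega)]; exact g5 r (by omega)
      · rw [show stepA M c Hn (n'+1) = Hn by
          unfold stepA
          rw [if_neg (Nat.succ_ne_zero n'), if_neg hm]]
        refine ⟨g1, g2, ?_, g4, fun r hr => g5 r (by omega)⟩
        intro r hr
        by_cases hrn : r = n' + 1
        · subst hrn
          rw [g5 _ le_rfl, Hf, if_neg hm]
        · exact g3 r (by omega)

lemma map0_getD (M : List (List Int)) (r : Nat) :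
    ((M.map (fun row => row.map (fun _ => (0 : Int)))).getD r []) =
      (M.getD r []).map (fun _ => (0 : Int)) := by
  by_cases hr : r < M.length
  · rw [List.getD_eq_getElem _ _ (by simpa using hr), List.getD_eq_getElem _ _ hr]
    simp
  · rw [List.getD_eq_default _ _ (by simpa using Nat.le_of_not_lt hr),
      List.getD_eq_default _ _ (Nat.le_of_not_lt hr)]
    rfl

lemma map0_entry (row : List Int) (c : Nat) : (row.map (fun _ => (0 : Int))).getD c 0 = 0 := by
  by_cases hc : c < row.length
  · rw [List.getD_eq_getElem _ _ (by simpa using hc)]; simp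
  · rw [List.getD_eq_default _ _ (by simpa using Nat.le_of_not_lt hc)]

lemma outerA (M : List (List Int)) (w : Nat)
    (hw : ∀ r, r < M.length → w ≤ (M.getD r []).length) :
    ∀ m, m ≤ w →
    ((List.range m).foldl (fun H c => (List.range M.length).foldl (stepA M c) H)
        (M.map (fun row => row.map (fun _ => (0 : Int))))).length = M.length ∧
    (∀ r, (((List.range m).foldl (fun H c => (List.range M.length).foldl (stepA M c) H)
        (M.map (fun row => row.map (fun _ => (0 : Int))))).getD r []).length = (M.getD r []).length) ∧
    (∀ r c, (((List.range m).foldl (fun H c => (List.range M.length).foldl (stepA M c) H)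
        (M.map (fun row => row.map (fun _ => (0 : Int))))).getD r []).getD c 0 =
      if c < m ∧ r < M.length then Hf M r c else 0) := by
  intro m
  induction m with
  | zero =>
    intro _
    simp only [List.range_zero, List.foldl_nil]
    refine ⟨by simp, ?_, ?_⟩
    · intro r
      rw [map0_getD, List.length_map]
    · intro r c
      rw [map0_getD, map0_entry, if_neg (by omega)]
  | succ m IH =>
    intro hm
    obtain ⟨g1, g2, g3⟩ := IH (by omega)
    rw [List.range_succ, List.foldl_append, List.foldl_cons, List.foldl_nil]
    have h0c : ∀ r, (((List.range m).foldl (fun H c => (List.range M.length).foldl (stepA M c) H)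
        (M.map (fun row => row.map (fun _ => (0 : Int))))).getD r []).getD m 0 = 0 := by
      intro r
      rw [g3 r m]
      simp
    obtain ⟨k1, k2, k3, k4, k5⟩ :=
      innerA M m (fun r hr => by have := hw r hr; omega) M.length le_rfl _ g1 g2 h0c
    refine ⟨k1, k2, ?_⟩
    intro r c
    by_cases hr : r < M.length
    · by_cases hc : c = m
      · subst hc
        rw [k3 r hr, if_pos ⟨by omega, hr⟩]
      · rw [k4 r c hc, g3 r c]
        by_cases hcm : c < m
        · rw [if_pos ⟨hcm, hr⟩, if_pos ⟨by omega, hr⟩]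
        · rw [if_neg (by omega), if_neg (by omega)]
    · by_cases hc : c = m
      · subst hc
        rw [k5 r (by omega), if_neg (by omega)]
      · rw [k4 r c hc, g3 r c, if_neg (by omega), if_neg (by omega)]

-- ---------- the B-side heights chain ----------

def hBf (M : List (List Int)) (w : Nat) : Nat → List Int
  | 0 => (M.getD 0 []).take w
  | r+1 => nextH w (M.getD (r+1) []) (hBf M w r)

lemma hBf_length (M : List (List Int)) (w : Nat) (hw0 : w ≤ (M.getD 0 []).length) :
    ∀ r, (hBf M w r).length = w := by
  intro r
  cases r with
  | zero => rw [hBf, List.length_take]; omega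
  | succ r => rw [hBf, nextH, List.length_map, List.length_range]

lemma hBf_getD (M : List (List Int)) (w : Nat) :
    ∀ r c, c < w → (hBf M w r).getD c 0 = Hf M r c := by
  intro r
  induction r with
  | zero =>
    intro c hc
    rw [hBf, Hf]
    by_cases hcl : c < (M.getD 0 []).length
    · rw [List.getD_eq_getElem _ _ (by rw [List.length_take]; omega),
        List.getD_eq_getElem _ _ hcl]
      simp
    · rw [List.getD_eq_default _ _ (by rw [List.length_take]; omega),
        List.getD_eq_default _ _ (Nat.le_of_not_lt hcl)]
  | succ r IH =>
    intro c hc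
    rw [hBf, Hf, nextH, PySem.List.getD_map_range _ _ _ _ hc, IH c hc]

-- ---------- gluing the two folds together ----------

def stepB (w : Nat) (st : Int × List Int × Bool) (row : List Int) : Int × List Int × Bool :=
  (colLoop (if st.2.2 then st.2.1 else nextH w row st.2.1) w st.1,
    (if st.2.2 then st.2.1 else nextH w row st.2.1), false)

lemma alt_fold (w : Nat) : ∀ (rows : List (List Int)) (b : Int) (h : List Int),
    (rows.foldl (stepB w) (b, h, false)).1 =
      (rows.foldl (fun (p : Int × List Int) row =>
        (colLoop (nextH w row p.2) w p.1, nextH w row p.2)) (b, h)).1 := by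
  intro rows
  induction rows with
  | nil => intro b h; rfl
  | cons row rows IH => intro b h; exact IH _ _

lemma foldl_index {α : Type} (d : α) (f : Int → α → Int) :
    ∀ (l : List α) (a : Int), l.foldl f a = (List.range l.length).foldl (fun a i => f a (l.getD i d)) a := by
  intro l
  induction l using List.reverseRecOn with
  | nil => intro a; rfl
  | append_singleton l x IH =>
    intro a
    rw [List.foldl_append, List.foldl_cons, List.foldl_nil, List.length_append,
      List.length_singleton, List.range_succ, List.foldl_append, List.foldl_cons, List.foldl_nil]
    congr 1
    · rw [IH]
      apply PySem.List.foldl_congr_mem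
      intro acc i hi
      have hil : i < l.length := List.mem_range.mp hi
      rw [List.getD_eq_getElem l _ hil,
        List.getD_eq_getElem (l ++ [x]) _ (by simp; omega),
        List.getElem_append_left hil]
    · rw [List.getD_eq_getElem _ _ (by simp)]
      simp

lemma foldl_congr_nonneg : ∀ (l : List Nat) (a : Int) (f g : Int → Nat → Int), 0 ≤ a →
    (∀ acc i, 0 ≤ acc → i ∈ l → f acc i = g acc i) →
    (∀ acc i, 0 ≤ acc → i ∈ l → acc ≤ g acc i) →
    l.foldl f a = l.foldl g a := by
  intro l
  induction l with
  | nil => intro a f g _ _ _; rfl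
  | cons i l IH =>
    intro a f g ha hfg hg
    rw [List.foldl_cons, List.foldl_cons, hfg a i ha (by simp)]
    exact IH _ f g (le_trans ha (hg a i ha (by simp)))
      (fun acc j hacc hj => hfg acc j hacc (by simp [hj]))
      (fun acc j hacc hj => hg acc j hacc (by simp [hj]))

lemma bfold_run (M : List (List Int)) (w : Nat) (hw0 : w ≤ (M.getD 0 []).length) :
    ∀ (n k : Nat) (b : Int), M.length - (k+1) = n →
    ((M.drop (k+1)).foldl (fun (p : Int × List Int) row =>
        (colLoop (nextH w row p.2) w p.1, nextH w row p.2)) (b, hBf M w k)).1 =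
      (List.range (M.length - (k+1))).foldl (fun b j => S b (hBf M w (k+1+j))) b := by
  intro n
  induction n with
  | zero =>
    intro k b hn
    rw [hn, List.drop_eq_nil_of_le (by omega), List.range_zero, List.foldl_nil, List.foldl_nil]
  | succ n IH =>
    intro k b hn
    have hk : k + 1 < M.length := by omega
    rw [List.drop_eq_getElem_cons hk, List.foldl_cons]
    have hrow : M[k+1] = M.getD (k+1) [] := (List.getD_eq_getElem M [] hk).symm
    have hnext : nextH w M[k+1] (hBf M w k) = hBf M w (k+1) := by
      rw [hrow]; rfl
    rw [hnext]
    rw [show colLoop (hBf M w (k+1)) w (b, hBf M w k).1 = S b (hBf M w (k+1)) from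
      colLoop_run _ _ _ (hBf_length M w hw0 (k+1))]
    rw [IH (k+1) (S b (hBf M w (k+1))) (by omega), hn,
      List.range_succ_eq_map, List.foldl_cons, List.foldl_map]
    have h1 : M.length - (k + 1 + 1) = n := by omega
    rw [h1]
    apply PySem.List.foldl_congr_mem
    intro acc j _
    rw [show k + 1 + (j + 1) = k + 1 + 1 + j by omega]

-- ===== VERDICT (by name: the statement is the Claim_ definition above) =====
theorem solve_spec : Claim_equal_solve := by
  unfold Claim_equal_solve
  intro M _ hPre
  unfold Spec_solve
  cases M with
  | nil => rfl
  | cons r0 rest =>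
    by_cases hw : r0.length = 0
    · simp [solve, solve_alt, hw]
    · have hPre' : ∀ row ∈ (r0 :: rest), r0.length ≤ row.length := by
        rcases hPre with h | h | h
        · exact absurd h (by simp)
        · exact absurd h (by simpa using hw)
        · simpa using h
      have hwr : ∀ r, r < (r0 :: rest).length → r0.length ≤ ((r0 :: rest).getD r []).length := by
        intro r hr
        refine hPre' _ ?_
        rw [List.getD_eq_getElem _ _ hr]
        exact List.getElem_mem hr
      have hw0 : r0.length ≤ ((r0 :: rest).getD 0 []).length := hwr 0 (by simp)
      obtain ⟨o1, o2, o3⟩ := outerA (r0 :: rest) r0.length hwr r0.length le_rfl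
      have hA : solve (r0 :: rest) =
          (List.range (r0 :: rest).length).foldl
            (fun a r => S a (hBf (r0 :: rest) r0.length r)) 0 := by
        have hd : solve (r0 :: rest) =
            ((List.range r0.length).foldl
              (fun H c => (List.range (r0 :: rest).length).foldl (stepA (r0 :: rest) c) H)
              ((r0 :: rest).map (fun row => row.map (fun _ => (0 : Int))))).foldl
              (fun soln hrow => rowLoop hrow 0 [] soln) 0 := by
          simp only [solve]
          rw [if_neg hw]
          rfl
        rw [hd, foldl_index ([] : List Int), o1]
        apply foldl_congr_nonneg _ _ _ _ le_rfl
        · intro acc r hacc hr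
          have hrM : r < (r0 :: rest).length := List.mem_range.mp hr
          rw [rowLoop_S _ _ hacc]
          apply S_ext _ _ _ hacc
          · rw [hBf_length (r0 :: rest) r0.length hw0 r, o2 r]
            exact hwr r hrM
          · intro j
            rw [o3 r j]
            by_cases hj : j < r0.length
            · rw [if_pos ⟨hj, hrM⟩, hBf_getD (r0 :: rest) r0.length r j hj]
            · rw [if_neg (by omega),
                List.getD_eq_default _ _ (by rw [hBf_length (r0 :: rest) r0.length hw0 r]; omega)]
        · intro acc r hacc _
          exact acc_le_S acc _
      have hB : solve_alt (r0 :: rest) =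
          (List.range (r0 :: rest).length).foldl
            (fun a r => S a (hBf (r0 :: rest) r0.length r)) 0 := by
        simp only [solve_alt]
        rw [if_neg hw]
        show ((r0 :: rest).foldl (stepB r0.length) ((0 : Int), r0.take r0.length, true)).1 = _
        rw [List.foldl_cons]
        show (rest.foldl (stepB r0.length) ((colLoop (r0.take r0.length) r0.length 0), r0.take r0.length, false)).1 = _
        rw [alt_fold]
        have hb0 : r0.take r0.length = hBf (r0 :: rest) r0.length 0 := rfl
        have hc0 : colLoop (hBf (r0 :: rest) r0.length 0) r0.length 0 =
            S 0 (hBf (r0 :: rest) r0.length 0) :=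
          colLoop_run _ _ _ (hBf_length (r0 :: rest) r0.length hw0 0)
        rw [hb0, hc0]
        have := bfold_run (r0 :: rest) r0.length hw0 ((r0 :: rest).length - 1) 0
          (S 0 (hBf (r0 :: rest) r0.length 0)) rfl
        rw [show (r0 :: rest).drop (0 + 1) = rest from rfl] at this
        rw [this]
        rw [show (r0 :: rest).length = rest.length + 1 from rfl, List.range_succ_eq_map,
          List.foldl_cons, List.foldl_map]
        rw [show rest.length + 1 - (0 + 1) = rest.length by omega]
        apply PySem.List.foldl_congr_mem
        intro acc j _
        have : 0 + 1 + j = j + 1 := by omega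
        rw [this]
      rw [hA, hB]
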